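-- pv_equiv track=rewrite | github.com/pypi-data/pypi-mirror-187 | packages/autoutils/autoutils-0.5.0.tar.gz/autoutils-0.5.0/autoutils/log.py | get_outer_detail
-- ===== SOURCE A (Python) =====
-- def get_outer_detail(data_list: [str], sep: str = " - "):
--     """
--         For remove repeat
--     """
--     detail = ""
--     last_cond = False
--     for data in data_list:
--         cond = data != ""
--         if cond and last_cond:
--             detail += sep
--         detail += str(data)
--         last_cond = cond
--     if detail != "":
--         return "[ " + detail + " ] "
--     else:
--         return detail
-- ===== SOURCE B (Python) =====
-- from itertools import groupby
--
--
-- def get_outer_detail(data_list: [str], sep: str = " - "):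
--     detail = "".join(
--         sep.join(str(x) for x in run)
--         for key, run in groupby(data_list, key=lambda x: x != "")
--         if key
--     )
--     return "[ " + detail + " ] " if detail != "" else detail
-- ===== Notes on version B (the rewrite author's own statement) =====
-- stated objective: idiomatic
-- what changed: B replaces A's single pass carrying last_cond mutable state with itertools.groupby into maximal truthiness runs, sep-joining each non-empty run and concatenating the run-strings.
import Mathlib
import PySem

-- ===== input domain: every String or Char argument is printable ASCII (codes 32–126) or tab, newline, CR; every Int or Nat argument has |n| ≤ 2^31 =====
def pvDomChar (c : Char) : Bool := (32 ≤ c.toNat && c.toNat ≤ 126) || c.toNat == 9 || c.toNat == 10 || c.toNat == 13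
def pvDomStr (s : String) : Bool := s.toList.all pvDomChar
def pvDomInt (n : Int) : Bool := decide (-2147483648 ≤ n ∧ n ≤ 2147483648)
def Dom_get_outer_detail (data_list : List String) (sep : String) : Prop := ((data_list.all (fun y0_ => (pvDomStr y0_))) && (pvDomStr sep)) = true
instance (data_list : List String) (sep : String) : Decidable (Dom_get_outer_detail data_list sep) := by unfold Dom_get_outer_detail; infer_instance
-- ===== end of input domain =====

-- B groups the list into maximal runs of equal truthiness (itertools.groupby) and joins
-- the non-empty runs, instead of A's single pass carrying last_cond state; objective: idiomatic.

-- ===== PORT A =====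
-- loop body of A: state = (detail, last_cond)
def pvStepA (sep : String) (st : String × Bool) (data : String) : String × Bool :=
  let cond := data != ""
  let detail := if cond && st.2 then st.1 ++ sep else st.1
  (detail ++ data, cond)

def get_outer_detail (data_list : List String) (sep : String) : String :=
  let r := data_list.foldl (pvStepA sep) ("", false)
  if r.1 != "" then "[ " ++ r.1 ++ " ] " else r.1

-- ===== PORT B =====
-- itertools.groupby(data_list, key=lambda x: x != "") as a list of (key, run) pairs
def pvRuns : List String → List (Bool × List String)
  | [] => []
  | x :: rest =>
      (x != "", x :: rest.takeWhile (fun y => (y != "") == (x != ""))) ::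
        pvRuns (rest.dropWhile (fun y => (y != "") == (x != "")))
termination_by xs => xs.length
decreasing_by simpa using Nat.lt_succ_of_le (List.length_dropWhile_le _ _)

def get_outer_detail_alt (data_list : List String) (sep : String) : String :=
  let detail := PySem.Str.join "" ((pvRuns data_list).filterMap
    (fun g => if g.1 then some (PySem.Str.join sep g.2) else none))
  if detail != "" then "[ " ++ detail ++ " ] " else detail

-- ===== PRECONDITION & SPEC =====
def Spec_get_outer_detail (data_list : List String) (sep : String) (out : String) : Prop := out = get_outer_detail_alt data_list sep
instance (data_list : List String) (sep : String) (out : String) : Decidable (Spec_get_outer_detail data_list sep out) := by unfold Spec_get_outer_detail; infer_instance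

-- ===== CLAIM (what is proved, stated in full; the proofs are below) =====
def Claim_equal_get_outer_detail : Prop := ∀ (data_list : List String) (sep : String), Dom_get_outer_detail data_list sep → Spec_get_outer_detail data_list sep (get_outer_detail data_list sep)

-- ===== LEMMAS AND PROOFS =====

-- common characterisation of the detail string: pvG sep xs b = detail produced after state b
def pvG (sep : String) : List String → Bool → String
  | [], _ => ""
  | x :: xs, b => (if (x != "") && b then sep else "") ++ x ++ pvG sep xs (x != "")

theorem pv_join_empty_cons (a : String) (l : List String) :
    PySem.Str.join "" (a :: l) = a ++ PySem.Str.join "" l := by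
  cases l with
  | nil => simp [PySem.Str.join, PySem.Chars.join_singleton, PySem.Chars.join_nil,
      String.ofList_toList]
  | cons y r =>
    simp [PySem.Str.join, PySem.Chars.join_cons_cons, String.ofList_append,
      String.ofList_toList]

theorem pv_join_cons_cons (sep x y : String) (r : List String) :
    PySem.Str.join sep (x :: y :: r) = x ++ sep ++ PySem.Str.join sep (y :: r) := by
  simp [PySem.Str.join, PySem.Chars.join_cons_cons, String.ofList_append,
    String.ofList_toList, String.append_assoc]

theorem pv_foldA (sep : String) : ∀ (xs : List String) (d : String) (b : Bool),
    (xs.foldl (pvStepA sep) (d, b)).1 = d ++ pvG sep xs b := by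
  intro xs
  induction xs with
  | nil => intro d b; simp [pvG]
  | cons x xs ih =>
    intro d b
    simp only [List.foldl_cons, pvStepA]
    rw [ih]
    cases h : (x != "") && b <;> simp [pvG, h, String.append_assoc]

theorem pvG_empty_cons (sep : String) (xs : List String) (b : Bool) :
    pvG sep ("" :: xs) b = pvG sep xs false := by
  simp [pvG]

theorem pvG_all_empty (sep : String) : ∀ (t : List String), (∀ y ∈ t, y = "") →
    ∀ (u : List String), pvG sep (t ++ u) false = pvG sep u false := by
  intro t
  induction t with
  | nil => intro _ u; rfl
  | cons z t ih =>
    intro h u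
    have hz : z = "" := h z (by simp)
    subst hz
    rw [List.cons_append, pvG_empty_cons]
    exact ih (fun y hy => h y (by simp [hy])) u

theorem pvG_run (sep : String) : ∀ (r : List String), r ≠ [] →
    (∀ y ∈ r, (y != "") = true) → ∀ (rest : List String) (b : Bool),
    pvG sep (r ++ rest) b =
      (if b then sep else "") ++ PySem.Str.join sep r ++ pvG sep rest true := by
  intro r
  induction r with
  | nil => intro h; exact absurd rfl h
  | cons x t ih =>
    intro _ hall rest b
    have hx : (x != "") = true := hall x (by simp)
    cases t with
    | nil =>
      cases b <;>
        simp [pvG, hx, PySem.Str.join, PySem.Chars.join_singleton, String.ofList_toList,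
          String.append_assoc]
    | cons y t' =>
      have htail : ∀ y' ∈ y :: t', (y' != "") = true := fun y' hy' => hall y' (by simp [hy'])
      rw [List.cons_append, pv_join_cons_cons]
      simp only [pvG, hx]
      rw [ih (by simp) htail rest true]
      cases b <;> simp [String.append_assoc]

theorem pvG_false_of_head_empty (sep : String) (u : List String)
    (h : ∀ z, u.head? = some z → z = "") (b : Bool) :
    pvG sep u b = pvG sep u false := by
  cases u with
  | nil => rfl
  | cons z t =>
    have hz : z = "" := h z rfl
    subst hz
    simp [pvG]

theorem pv_runsG (sep : String) : ∀ (xs : List String),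
    PySem.Str.join "" ((pvRuns xs).filterMap
      (fun g => if g.1 then some (PySem.Str.join sep g.2) else none)) = pvG sep xs false := by
  intro xs
  induction xs using pvRuns.induct with
  | case1 => simp [pvRuns, pvG, PySem.Str.join, PySem.Chars.join_nil]
  | case2 x rest ih =>
    rw [show pvRuns (x :: rest) = (x != "", x :: rest.takeWhile (fun y => (y != "") == (x != ""))) ::
          pvRuns (rest.dropWhile (fun y => (y != "") == (x != ""))) from by
        rw [pvRuns]]
    have hsplit := List.takeWhile_append_dropWhile
      (p := fun y => (y != "") == (x != "")) (l := rest)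
    by_cases hx : x = ""
    · -- run of falsy elements: dropped by the filterMap, absorbed by pvG_all_empty
      subst hx
      have hk : ("" != "") = false := by decide
      simp only [hk] at ih hsplit
      rw [List.filterMap_cons]
      simp only [hk, Bool.false_eq_true, if_false]
      rw [ih]
      conv_rhs => rw [show ("" :: rest : List String) =
        ("" :: rest.takeWhile (fun y => (y != "") == false)) ++
          rest.dropWhile (fun y => (y != "") == false) from by
            rw [List.cons_append]; rw [hsplit]]
      exact (pvG_all_empty sep _
        (by
          intro y hy
          rcases List.mem_cons.mp hy with hy | hy
          · exact hy
          · have := List.mem_takeWhile_imp hy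
            simpa using this)
        _).symm
    · have hk : (x != "") = true := by simpa using hx
      simp only [hk] at ih hsplit
      rw [List.filterMap_cons]
      simp only [hk, if_true]
      rw [pv_join_empty_cons, ih]
      conv_rhs => rw [show (x :: rest : List String) =
        (x :: rest.takeWhile (fun y => (y != "") == true)) ++
          rest.dropWhile (fun y => (y != "") == true) from by
            rw [List.cons_append]; rw [hsplit]]
      rw [pvG_run sep _ (by simp)
        (by
          intro y hy
          rcases List.mem_cons.mp hy with hy | hy
          · subst hy; exact hk
          · have := List.mem_takeWhile_imp hy
            simpa using this) _ false]
      rw [pvG_false_of_head_empty sep _ (by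
        intro z hz
        have hlt := List.head?_dropWhile_not (p := fun y => (y != "") == true) (l := rest)
        rw [hz] at hlt
        simpa using hlt) true]
      simp

-- ===== VERDICT (by name: the statement is the Claim_ definition above) =====
theorem get_outer_detail_spec : Claim_equal_get_outer_detail := by
  intro data_list sep _
  unfold Spec_get_outer_detail
  have h := pv_foldA sep data_list "" false
  rw [String.empty_append] at h
  simp only [get_outer_detail, get_outer_detail_alt, pv_runsG sep data_list, h]
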